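-- pv_equiv track=rewrite | github.com/aditya25042005/ocr_extract | backend/ocr_backend/ml/handwritten_ocr.py | merge_boxes_into_lines
-- ===== SOURCE A (Python) =====
-- def merge_boxes_into_lines(boxes, y_threshold=30):
--     """
--     Merges adjacent word-level boxes into a single line-level box.
--     Crucial for fixing fragmentation (e.g., keeping 'Blood group' together).
--     """
--     if not boxes:
--         return []
--
--     # 1. Sort primarily by Y (top to bottom)
--     boxes = sorted(boxes, key=lambda b: b[1])
--
--     lines = []
--     current_line = [boxes[0]]
--
--     # 2. Group boxes into lines based on Y-proximity
--     for i in range(1, len(boxes)):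
--         box = boxes[i]
--         last_box = current_line[-1]
--
--         # Calculate vertical center of boxes
--         cy_box = box[1] + (box[3] / 2)
--         cy_last = last_box[1] + (last_box[3] / 2)
--
--         # If vertical centers are close, they are on the same line
--         if abs(cy_box - cy_last) < y_threshold:
--             current_line.append(box)
--         else:
--             lines.append(current_line)
--             current_line = [box]
--     lines.append(current_line)
--
--     # 3. Merge the groups into single bounding boxes
--     merged_results = []
--     for line_boxes in lines:
--         # Sort words inside the line Left-to-Right (X-coordinate)
--         # This fixes the "A- blood group" vs "Blood group A-" ordering issue
--         line_boxes = sorted(line_boxes, key=lambda b: b[0])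
--
--         x_min = min(b[0] for b in line_boxes)
--         y_min = min(b[1] for b in line_boxes)
--         x_max = max(b[0] + b[2] for b in line_boxes)
--         y_max = max(b[1] + b[3] for b in line_boxes)
--
--         w = x_max - x_min
--         h = y_max - y_min
--
--         merged_results.append((x_min, y_min, w, h))
--
--     return merged_results
-- ===== SOURCE B (Python) =====
-- def merge_boxes_into_lines(boxes, y_threshold=30):
--     """Fused single pass: sort by Y once, then maintain a running
--     bounding-box accumulator instead of building lists of lines.
--     Integer doubled-center comparison (2*cy) is exact for A's /2 floats."""
--     if not boxes:
--         return []
--     bs = sorted(boxes, key=lambda b: b[1])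
--     x, y, w, h = bs[0]
--     x_min, y_min, x_max, y_max = x, y, x + w, y + h
--     cy2_last = 2 * y + h
--     out = []
--     for x, y, w, h in bs[1:]:
--         cy2 = 2 * y + h
--         if abs(cy2 - cy2_last) < 2 * y_threshold:
--             x_min = min(x_min, x)
--             y_min = min(y_min, y)
--             x_max = max(x_max, x + w)
--             y_max = max(y_max, y + h)
--         else:
--             out.append((x_min, y_min, x_max - x_min, y_max - y_min))
--             x_min, y_min, x_max, y_max = x, y, x + w, y + h
--         cy2_last = cy2
--     out.append((x_min, y_min, x_max - x_min, y_max - y_min))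
--     return out
-- ===== Notes on version B (the rewrite author's own statement) =====
-- stated objective: simpler
-- what changed: Replaces A's two-phase structure (group boxes into a list of lines, then reduce each line with an inner X-sort and four generator passes) with one fused pass over the Y-sorted boxes that maintains a running (x_min,y_min,x_max,y_max) accumulator and the last box's doubled vertical center, flushing a finished line tuple when the center jumps; the intermediate list-of-lists and the result-irrelevant X-sort are gone.
import Mathlib
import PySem

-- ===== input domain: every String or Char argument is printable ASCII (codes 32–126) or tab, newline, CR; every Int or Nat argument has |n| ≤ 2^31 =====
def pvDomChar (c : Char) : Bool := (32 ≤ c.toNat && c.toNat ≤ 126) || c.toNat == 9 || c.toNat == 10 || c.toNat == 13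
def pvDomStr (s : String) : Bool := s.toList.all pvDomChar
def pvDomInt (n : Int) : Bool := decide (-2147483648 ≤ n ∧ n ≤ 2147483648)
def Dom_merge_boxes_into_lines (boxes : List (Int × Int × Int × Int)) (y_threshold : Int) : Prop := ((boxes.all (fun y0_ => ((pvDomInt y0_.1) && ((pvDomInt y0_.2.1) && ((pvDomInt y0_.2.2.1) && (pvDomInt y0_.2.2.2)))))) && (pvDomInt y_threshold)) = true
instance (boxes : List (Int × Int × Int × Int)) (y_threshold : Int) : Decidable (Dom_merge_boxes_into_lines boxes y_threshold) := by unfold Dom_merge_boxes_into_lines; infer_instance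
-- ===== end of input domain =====

-- B replaces A's two-phase grouping (list of lines, then reduce each line) with one fused
-- pass keeping a running bounding-box accumulator; objective: simpler.
-- Note on floats: A compares abs(cy_box - cy_last) < y_threshold where cy = y + h/2 are
-- exact half-integers (|2cy| ≤ 3·2^31 < 2^53, so every value and difference is an exact
-- double on Dom); the ports use the equivalent exact integer form |2cy_box - 2cy_last| < 2·thr.

-- ===== PORT A =====
-- doubled vertical center 2*(b[1] + b[3]/2), exact in Int
def pvCy2 (b : Int × Int × Int × Int) : Int := 2 * b.2.1 + b.2.2.2

-- the grouping loop: `for i in range(1, len(boxes)) : …` over the remaining boxes,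
-- carrying current_line and lines; current_line[-1] ported as getLastD (current_line is
-- never empty, so the default is never used)
def pvGroupA (y_threshold : Int) : List (Int × Int × Int × Int) →
    List (Int × Int × Int × Int) → List (List (Int × Int × Int × Int)) →
    List (List (Int × Int × Int × Int))
  | [], current_line, lines => lines ++ [current_line]
  | box :: rest, current_line, lines =>
      let last_box := current_line.getLastD (0, 0, 0, 0)
      if |pvCy2 box - pvCy2 last_box| < 2 * y_threshold then
        pvGroupA y_threshold rest (current_line ++ [box]) lines
      else
        pvGroupA y_threshold rest [box] (lines ++ [current_line])

-- phase 3 body: inner X-sort, then min/max generator passes (min/max of a nonempty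
-- list ported as foldl over head; line_boxes is never empty in A)
def pvReduceA (line_boxes : List (Int × Int × Int × Int)) : Int × Int × Int × Int :=
  let line_boxes := PySem.List.sorted line_boxes (fun b => b.1) false
  match line_boxes with
  | [] => (0, 0, 0, 0)  -- unreachable: lines are nonempty
  | b0 :: bs =>
      let x_min := bs.foldl (fun m b => min m b.1) b0.1
      let y_min := bs.foldl (fun m b => min m b.2.1) b0.2.1
      let x_max := bs.foldl (fun m b => max m (b.1 + b.2.2.1)) (b0.1 + b0.2.2.1)
      let y_max := bs.foldl (fun m b => max m (b.2.1 + b.2.2.2)) (b0.2.1 + b0.2.2.2)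
      (x_min, y_min, x_max - x_min, y_max - y_min)

def merge_boxes_into_lines (boxes : List (Int × Int × Int × Int)) (y_threshold : Int) : List (Int × Int × Int × Int) :=
  if boxes = [] then []
  else
    match PySem.List.sorted boxes (fun b => b.2.1) false with
    | [] => []  -- unreachable: sorted of nonempty list is nonempty
    | b0 :: rest => (pvGroupA y_threshold rest [b0] []).map pvReduceA

-- ===== PORT B =====
-- fused loop of Source B: out, running (x_min, y_min, x_max, y_max), cy2_last
def pvLoopB (y_threshold : Int) : List (Int × Int × Int × Int) →
    List (Int × Int × Int × Int) → Int × Int × Int × Int → Int →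
    List (Int × Int × Int × Int)
  | [], out, (x_min, y_min, x_max, y_max), _ =>
      out ++ [(x_min, y_min, x_max - x_min, y_max - y_min)]
  | (x, y, w, h) :: rest, out, (x_min, y_min, x_max, y_max), cy2_last =>
      let cy2 := 2 * y + h
      if |cy2 - cy2_last| < 2 * y_threshold then
        pvLoopB y_threshold rest out (min x_min x, min y_min y, max x_max (x + w), max y_max (y + h)) cy2
      else
        pvLoopB y_threshold rest (out ++ [(x_min, y_min, x_max - x_min, y_max - y_min)]) (x, y, x + w, y + h) cy2

def merge_boxes_into_lines_alt (boxes : List (Int × Int × Int × Int)) (y_threshold : Int) : List (Int × Int × Int × Int) :=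
  if boxes = [] then []
  else
    match PySem.List.sorted boxes (fun b => b.2.1) false with
    | [] => []  -- unreachable
    | (x, y, w, h) :: rest => pvLoopB y_threshold rest [] (x, y, x + w, y + h) (2 * y + h)

-- ===== PRECONDITION & SPEC =====
def Spec_merge_boxes_into_lines (boxes : List (Int × Int × Int × Int)) (y_threshold : Int) (out : List (Int × Int × Int × Int)) : Prop := out = merge_boxes_into_lines_alt boxes y_threshold
instance (boxes : List (Int × Int × Int × Int)) (y_threshold : Int) (out : List (Int × Int × Int × Int)) : Decidable (Spec_merge_boxes_into_lines boxes y_threshold out) := by unfold Spec_merge_boxes_into_lines; infer_instance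

-- ===== CLAIM (what is proved, stated in full; the proofs are below) =====
def Claim_equal_merge_boxes_into_lines : Prop := ∀ (boxes : List (Int × Int × Int × Int)) (y_threshold : Int), Dom_merge_boxes_into_lines boxes y_threshold → Spec_merge_boxes_into_lines boxes y_threshold (merge_boxes_into_lines boxes y_threshold)

-- ===== LEMMAS AND PROOFS =====

-- the running bounding-box accumulator over a nonempty line
def pvBBoxStep (acc : Int × Int × Int × Int) (b : Int × Int × Int × Int) : Int × Int × Int × Int :=
  (min acc.1 b.1, min acc.2.1 b.2.1, max acc.2.2.1 (b.1 + b.2.2.1), max acc.2.2.2 (b.2.1 + b.2.2.2))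

def pvBBox0 (b : Int × Int × Int × Int) : Int × Int × Int × Int :=
  (b.1, b.2.1, b.1 + b.2.2.1, b.2.1 + b.2.2.2)

def pvFinish (a : Int × Int × Int × Int) : Int × Int × Int × Int :=
  (a.1, a.2.1, a.2.2.1 - a.1, a.2.2.2 - a.2.1)

theorem pvBBox_fold_components (bs : List (Int × Int × Int × Int)) (acc : Int × Int × Int × Int) :
    bs.foldl pvBBoxStep acc =
      (bs.foldl (fun m b => min m b.1) acc.1,
       bs.foldl (fun m b => min m b.2.1) acc.2.1,
       bs.foldl (fun m b => max m (b.1 + b.2.2.1)) acc.2.2.1,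
       bs.foldl (fun m b => max m (b.2.1 + b.2.2.2)) acc.2.2.2) := by
  induction bs generalizing acc with
  | nil => rfl
  | cons b bs ih => simp [List.foldl_cons, ih, pvBBoxStep]

-- foldl min with the head absorbed is invariant under permutation of a nonempty list
theorem pvFoldl_min_absorb_mem (l : List Int) (a x : Int) (hx : x ∈ l) :
    l.foldl min (min a x) = l.foldl min a := by
  induction l generalizing a with
  | nil => cases hx
  | cons y ys ih =>
      simp only [List.foldl_cons]
      rcases List.mem_cons.mp hx with h | h
      · subst h; rw [min_assoc, min_self]
      · rw [show min (min a x) y = min (min a y) x by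
              rw [min_assoc, min_assoc, min_comm x y], ih _ h]

theorem pvFoldl_min_perm (h : Int) (t : List Int) (h' : Int) (t' : List Int)
    (hp : (h :: t).Perm (h' :: t')) :
    t.foldl min h = t'.foldl min h' := by
  have e1 : t.foldl min h = (h :: t).foldl min h := by simp [List.foldl_cons]
  have e2 : (h :: t).foldl min h = (h' :: t').foldl min h := hp.foldl_eq (f := min) h
  have e3 : (h' :: t').foldl min h = t'.foldl min (min h h') := by
    simp [List.foldl_cons]
  rw [e1, e2, e3]
  rcases List.mem_cons.mp (hp.mem_iff.mp (List.mem_cons_self)) with hh | hh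
  · rw [hh, min_self]
  · rw [min_comm, pvFoldl_min_absorb_mem t' h' h hh]

theorem pvFoldl_max_perm (h : Int) (t : List Int) (h' : Int) (t' : List Int)
    (hp : (h :: t).Perm (h' :: t')) :
    t.foldl max h = t'.foldl max h' := by
  have hp' : (-h :: t.map (fun z => -z)).Perm (-h' :: t'.map (fun z => -z)) := by
    have := hp.map (fun z : Int => -z); simpa using this
  have := pvFoldl_min_perm (-h) (t.map (fun z => -z)) (-h') (t'.map (fun z => -z)) hp'
  have lmin : ∀ (a : Int) (l : List Int),
      (l.map (fun z => -z)).foldl min (-a) = -(l.foldl max a) := by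
    intro a l
    induction l generalizing a with
    | nil => rfl
    | cons x xs ih =>
        simp only [List.map_cons, List.foldl_cons]
        rw [show min (-a) (-x) = -(max a x) by omega, ih]
  rw [lmin, lmin] at this
  omega

-- pvReduceA of a nonempty line equals finishing the bbox fold over the unsorted line
theorem pvReduceA_eq_bbox (b0 : Int × Int × Int × Int) (bs : List (Int × Int × Int × Int)) :
    pvReduceA (b0 :: bs) = pvFinish (bs.foldl pvBBoxStep (pvBBox0 b0)) := by
  unfold pvReduceA
  have hperm : (PySem.List.sorted (b0 :: bs) (fun b => b.1) false).Perm (b0 :: bs) :=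
    PySem.List.sorted_perm _ _ _
  have hnil : PySem.List.sorted (b0 :: bs) (fun b => b.1) false ≠ [] := by
    intro h; have := hperm.length_eq; simp [h] at this
  obtain ⟨c0, cs, hc⟩ := List.exists_cons_of_ne_nil hnil
  rw [hc]
  rw [hc] at hperm
  have key : ∀ (f : (Int × Int × Int × Int) → Int),
      ((c0 :: cs).map f).Perm ((b0 :: bs).map f) := fun f => hperm.map f
  have minf : ∀ (f : (Int × Int × Int × Int) → Int),
      cs.foldl (fun m b => min m (f b)) (f c0) = bs.foldl (fun m b => min m (f b)) (f b0) := by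
    intro f
    have := pvFoldl_min_perm (f c0) (cs.map f) (f b0) (bs.map f) (by simpa using key f)
    simpa [List.foldl_map] using this
  have maxf : ∀ (f : (Int × Int × Int × Int) → Int),
      cs.foldl (fun m b => max m (f b)) (f c0) = bs.foldl (fun m b => max m (f b)) (f b0) := by
    intro f
    have := pvFoldl_max_perm (f c0) (cs.map f) (f b0) (bs.map f) (by simpa using key f)
    simpa [List.foldl_map] using this
  simp only [pvBBox_fold_components, pvFinish, pvBBox0]
  rw [minf (fun b => b.1), minf (fun b => b.2.1),
      maxf (fun b => b.1 + b.2.2.1), maxf (fun b => b.2.1 + b.2.2.2)]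

-- main loop invariant: A's grouping then reduction equals B's fused loop
theorem pvMain (thr : Int) (rest : List (Int × Int × Int × Int)) :
    ∀ (c0 : Int × Int × Int × Int) (cs : List (Int × Int × Int × Int))
      (lines : List (List (Int × Int × Int × Int))),
    (pvGroupA thr rest (c0 :: cs) lines).map pvReduceA =
      pvLoopB thr rest (lines.map pvReduceA) (cs.foldl pvBBoxStep (pvBBox0 c0))
        (pvCy2 ((c0 :: cs).getLastD (0, 0, 0, 0))) := by
  induction rest with
  | nil =>
      intro c0 cs lines
      simp [pvGroupA, pvLoopB, pvReduceA_eq_bbox]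
      obtain ⟨xm, ym, xM, yM⟩ := cs.foldl pvBBoxStep (pvBBox0 c0)
      simp [pvFinish]
  | cons b rest ih =>
      intro c0 cs lines
      obtain ⟨x, y, w, h⟩ := b
      simp only [pvGroupA]
      rcases hacc : cs.foldl pvBBoxStep (pvBBox0 c0) with ⟨xm, ym, xM, yM⟩
      by_cases hcond : |pvCy2 (x, y, w, h) - pvCy2 ((c0 :: cs).getLastD (0, 0, 0, 0))| < 2 * thr
      · rw [if_pos hcond]
        have hsnoc : (c0 :: cs) ++ [(x, y, w, h)] = c0 :: (cs ++ [(x, y, w, h)]) := by simp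
        rw [hsnoc, ih c0 (cs ++ [(x, y, w, h)]) lines]
        have hl : (c0 :: (cs ++ [(x, y, w, h)])).getLastD (0, 0, 0, 0) = (x, y, w, h) := by
          rw [← hsnoc]; exact List.getLastD_concat
        rw [hl, List.foldl_append, hacc]
        simp only [List.foldl_cons, List.foldl_nil, pvBBoxStep, pvLoopB]
        rw [if_pos (by simpa [pvCy2] using hcond)]
        simp [pvCy2]
      · rw [if_neg hcond]
        rw [ih (x, y, w, h) [] (lines ++ [c0 :: cs])]
        simp only [List.foldl_nil, List.map_append, List.map_cons, List.map_nil, pvLoopB]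
        rw [if_neg (by simpa [pvCy2] using hcond)]
        rcases cs with _ | ⟨c1, cs'⟩
        · simp only [List.foldl_nil] at hacc
          rw [pvReduceA_eq_bbox, List.foldl_nil, hacc]
          simp [pvFinish, pvBBox0, pvCy2, List.getLastD]
        · rw [pvReduceA_eq_bbox, hacc]
          simp [pvFinish, pvBBox0, pvCy2, List.getLastD]

-- ===== VERDICT (by name: the statement is the Claim_ definition above) =====
theorem merge_boxes_into_lines_spec : Claim_equal_merge_boxes_into_lines := by
  intro boxes thr _
  unfold Spec_merge_boxes_into_lines merge_boxes_into_lines merge_boxes_into_lines_alt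
  by_cases hb : boxes = []
  · simp [hb]
  · rw [if_neg hb, if_neg hb]
    have hnil : PySem.List.sorted boxes (fun b => b.2.1) false ≠ [] := by
      intro h
      have := (PySem.List.sorted_perm boxes (fun b => b.2.1) false).length_eq
      simp [h] at this
      exact hb (List.eq_nil_of_length_eq_zero this.symm)
    obtain ⟨b0, rest, hc⟩ := List.exists_cons_of_ne_nil hnil
    rw [hc]
    obtain ⟨x, y, w, h⟩ := b0
    have := pvMain thr rest (x, y, w, h) [] []
    simpa [pvBBox0, pvCy2] using this
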